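-- pv_equiv track=rewrite | github.com/shinydev618/graphite | graphite/solvers/improved_portfolio_solver.py | _reorder_swaps
-- ===== SOURCE A (Python) =====
-- from typing import List, Union, Tuple
--
-- def _reorder_swaps(swaps: List[List[int]]) -> List[List[int]]:
--     """Reorder swaps to optimize execution order"""
--     if len(swaps) < 2:
--         return swaps
--
--     # Group swaps by portfolio and sort by amount (largest first)
--     portfolio_swaps = {}
--     for swap in swaps:
--         portfolio = swap[0]
--         if portfolio not in portfolio_swaps:
--             portfolio_swaps[portfolio] = []
--         portfolio_swaps[portfolio].append(swap)
--
--     # Sort swaps within each portfolio by amount (descending)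
--     for portfolio in portfolio_swaps:
--         portfolio_swaps[portfolio].sort(key=lambda x: x[3], reverse=True)
--
--     # Reconstruct with optimized order
--     reordered = []
--     for portfolio in sorted(portfolio_swaps.keys()):
--         reordered.extend(portfolio_swaps[portfolio])
--
--     return reordered
-- ===== SOURCE B (Python) =====
-- def _reorder_swaps(swaps):
--     """Reorder swaps to optimize execution order"""
--     if len(swaps) < 2:
--         return swaps
--     # One stable sort on a composite key: portfolio ascending, amount descending.
--     return sorted(swaps, key=lambda x: (x[0], -x[3]))
-- ===== Notes on version B (the rewrite author's own statement) =====
-- stated objective: simpler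
-- what changed: Replaces the dict-grouping, per-group reverse sorts and key-sorted concatenation with a single stable sort on the composite key (portfolio, -amount), relying on sort stability to preserve A's tie order.
import Mathlib
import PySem

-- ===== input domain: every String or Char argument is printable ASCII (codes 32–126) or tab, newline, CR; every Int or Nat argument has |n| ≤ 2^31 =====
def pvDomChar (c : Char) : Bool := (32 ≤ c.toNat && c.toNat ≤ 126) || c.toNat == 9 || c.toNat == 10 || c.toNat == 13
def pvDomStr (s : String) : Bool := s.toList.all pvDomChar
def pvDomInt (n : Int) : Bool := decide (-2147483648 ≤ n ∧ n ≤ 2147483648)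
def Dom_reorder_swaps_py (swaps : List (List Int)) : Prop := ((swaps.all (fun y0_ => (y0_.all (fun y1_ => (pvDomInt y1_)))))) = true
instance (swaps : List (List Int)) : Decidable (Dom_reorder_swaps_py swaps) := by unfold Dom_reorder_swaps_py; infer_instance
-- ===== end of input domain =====

-- B replaces A's dict-grouping + per-group reverse sorts + key-sorted concatenation by a single
-- stable sort on the composite key (portfolio, -amount); objective: simpler.


-- ===== PORT A =====
def reorder_swaps_py (swaps : List (List Int)) : List (List Int) :=
  if swaps.length < 2 then swaps
  else
    -- portfolio_swaps = {}; for swap in swaps: … append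
    let d1 : PySem.Dict Int (List (List Int)) :=
      swaps.foldl (fun d swap =>
        let portfolio := PySem.List.pyGetD swap 0 0
        let d := if d.contains portfolio then d else d.insert portfolio []
        d.modify portfolio [] (fun l => l ++ [swap])) PySem.Dict.empty
    -- for portfolio in portfolio_swaps: portfolio_swaps[portfolio].sort(key=λx. x[3], reverse=True)
    let d2 : PySem.Dict Int (List (List Int)) :=
      d1.keys.foldl (fun d portfolio =>
        d.modify portfolio [] (fun v =>
          PySem.List.sorted v (fun x => PySem.List.pyGetD x 3 0) true)) d1
    -- reordered = []; for portfolio in sorted(keys): reordered.extend(d[portfolio])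
    -- (the key is always present, so the Python lookup d[portfolio] is getD with any default)
    (PySem.List.sorted d2.keys (fun g => g) false).foldl
      (fun acc portfolio => acc ++ d2.getD portfolio []) []

-- ===== PORT B =====
def reorder_swaps_py_alt (swaps : List (List Int)) : List (List Int) :=
  if swaps.length < 2 then swaps
  else PySem.List.sorted2 swaps (fun x => PySem.List.pyGetD x 0 0)
        (fun x => -(PySem.List.pyGetD x 3 0)) false

-- ===== PRECONDITION & SPEC =====
-- Pre_ excludes exactly the inputs on which the Python A raises IndexError (swap[0] / swap[3]
-- on a row shorter than 4, reached only when len(swaps) ≥ 2); B raises there too.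
def Pre_reorder_swaps_py (swaps : List (List Int)) : Prop :=
  swaps.length < 2 ∨ ∀ s ∈ swaps, 4 ≤ s.length
instance (swaps : List (List Int)) : Decidable (Pre_reorder_swaps_py swaps) := by
  unfold Pre_reorder_swaps_py; infer_instance
def pvWitness_reorder_swaps_py : List (List Int) :=
  [[1, 0, 0, 5], [0, 0, 0, 7], [1, 0, 0, 9]]
def Spec_reorder_swaps_py (swaps : List (List Int)) (out : List (List Int)) : Prop := out = reorder_swaps_py_alt swaps
instance (swaps : List (List Int)) (out : List (List Int)) : Decidable (Spec_reorder_swaps_py swaps out) := by unfold Spec_reorder_swaps_py; infer_instance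

-- ===== CLAIM (what is proved, stated in full; the proofs are below) =====
def Claim_equal_reorder_swaps_py : Prop := ∀ (swaps : List (List Int)), Dom_reorder_swaps_py swaps → Pre_reorder_swaps_py swaps → Spec_reorder_swaps_py swaps (reorder_swaps_py swaps)

-- ===== LEMMAS AND PROOFS =====

-- insertBy walks past a prefix none of whose elements trigger `before`.
theorem pv_insertBy_skip {α : Type} (before : α → α → Bool) (x : α) (l1 l2 : List α)
    (h : ∀ y ∈ l1, before x y = false) :
    PySem.List.insertBy before x (l1 ++ l2) = l1 ++ PySem.List.insertBy before x l2 := by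
  induction l1 with
  | nil => simp
  | cons a t ih =>
    simp only [List.cons_append, PySem.List.insertBy, h a (by simp)]
    simp only [Bool.false_eq_true, if_false, List.cons.injEq, true_and]
    exact ih (fun y hy => h y (by simp [hy]))

-- inserting into l1 ++ l2 lands inside l1 when B2 agrees with Bg on l1 and every element of l2 triggers.
theorem pv_insertBy_within {α : Type} (B2 Bg : α → α → Bool) (x : α) (l1 l2 : List α)
    (h1 : ∀ y ∈ l1, B2 x y = Bg x y) (h2 : ∀ y ∈ l2, B2 x y = true) :
    PySem.List.insertBy B2 x (l1 ++ l2) = PySem.List.insertBy Bg x l1 ++ l2 := by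
  induction l1 with
  | nil =>
    cases l2 with
    | nil => simp [PySem.List.insertBy]
    | cons b t => simp [PySem.List.insertBy, h2 b (by simp)]
  | cons a t ih =>
    simp only [List.cons_append, PySem.List.insertBy, h1 a (by simp)]
    by_cases hba : Bg x a = true
    · simp [hba]
    · simp only [hba, Bool.false_eq_true, if_false]
      rw [ih (fun y hy => h1 y (by simp [hy]))]
      simp

-- membership in an insertion-sort fold
theorem pv_mem_foldl_insertBy {α : Type} (before : α → α → Bool) (xs acc : List α) (y : α) :
    y ∈ xs.foldl (fun acc x => PySem.List.insertBy before x acc) acc ↔ y ∈ acc ∨ y ∈ xs := by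
  induction xs generalizing acc with
  | nil => simp
  | cons a t ih => simp [ih, PySem.List.mem_insertBy]; tauto

-- when every current element triggers `before`, insertBy prepends
theorem pv_insertBy_front {α : Type} (before : α → α → Bool) (x : α) (l : List α)
    (h : ∀ y ∈ l, before x y = true) :
    PySem.List.insertBy before x l = x :: l := by
  cases l with
  | nil => simp [PySem.List.insertBy]
  | cons a t => simp [PySem.List.insertBy, h a (by simp)]

-- THE GROUPING THEOREM: an insertion sort under the composite predicate
--   B2 a b = (k a < k b) || (¬ k b < k a && Bg a b)
-- equals, for ANY strictly increasing enumeration K of the k-values, the concatenation of the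
-- per-group insertion sorts under Bg.
theorem pv_grouped {α : Type} (k : α → Int) (Bg : α → α → Bool) (xs : List α) (K : List Int)
    (hK : K.Pairwise (· < ·)) (hmem : ∀ g, g ∈ K ↔ g ∈ xs.map k) :
    xs.foldl (fun acc x =>
        PySem.List.insertBy
          (fun a b => decide (k a < k b) || (!decide (k b < k a) && Bg a b)) x acc) []
      = K.flatMap (fun g =>
          (xs.filter (fun x => k x == g)).foldl
            (fun acc x => PySem.List.insertBy Bg x acc) []) := by
  induction xs using List.reverseRecOn generalizing K with
  | nil =>
    have hKnil : K = [] :=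
      List.eq_nil_iff_forall_not_mem.2 (fun g hg => by simpa using (hmem g).1 hg)
    simp [hKnil]
  | append_singleton xs x ih =>
    have hkxK : k x ∈ K := (hmem (k x)).2 (by simp)
    obtain ⟨K1, K2, hsplit⟩ := List.append_of_mem hkxK
    subst hsplit
    have hpw := List.pairwise_append.1 hK
    have hK1 : ∀ g ∈ K1, g < k x := fun g hg => hpw.2.2 g hg (k x) (by simp)
    have hK2 : ∀ g ∈ K2, k x < g := fun g hg => (List.pairwise_cons.1 hpw.2.1).1 g hg
    -- group membership forces the key
    have hgrp : ∀ (g : Int) (y : α),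
        y ∈ (xs.filter (fun x => k x == g)).foldl
            (fun acc x => PySem.List.insertBy Bg x acc) [] → k y = g := by
      intro g y hy
      have := (pv_mem_foldl_insertBy Bg _ [] y).1 hy
      simp only [List.not_mem_nil, false_or] at this
      exact by simpa using (List.mem_filter.1 this).2
    -- the new element's group gains x at the end of its fold, other groups are unchanged
    have hfilt_eq : ∀ g : Int, g ≠ k x →
        (xs ++ [x]).filter (fun y => k y == g) = xs.filter (fun y => k y == g) := by
      intro g hg
      rw [List.filter_append]
      simp [Ne.symm hg]
    have hfilt_kx : (xs ++ [x]).filter (fun y => k y == k x)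
        = xs.filter (fun y => k y == k x) ++ [x] := by
      rw [List.filter_append]; simp
    rw [List.foldl_append]
    by_cases hx : k x ∈ xs.map k
    · -- existing portfolio: x is inserted into its own group
      have hmem' : ∀ g, g ∈ K1 ++ k x :: K2 ↔ g ∈ xs.map k := by
        intro g
        rw [hmem g]
        simp only [List.map_append, List.mem_append, List.map_cons, List.map_nil,
          List.mem_singleton]
        constructor
        · rintro (h | h)
          · exact h
          · rw [h]; exact hx
        · exact fun h => Or.inl h
      rw [ih _ hK hmem']
      simp only [List.foldl_cons, List.foldl_nil]
      rw [List.flatMap_append, List.flatMap_cons]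
      rw [pv_insertBy_skip _ x _ _ (by
        intro y hy
        obtain ⟨g, hg, hyg⟩ := List.mem_flatMap.1 hy
        have hlt : k y < k x := (hgrp g y hyg) ▸ hK1 g hg
        simp [hlt, lt_asymm hlt])]
      rw [pv_insertBy_within _ Bg x _ _
        (by
          intro y hy
          have he : k y = k x := hgrp _ y hy
          simp [he])
        (by
          intro y hy
          obtain ⟨g, hg, hyg⟩ := List.mem_flatMap.1 hy
          have hlt : k x < k y := (hgrp g y hyg) ▸ hK2 g hg
          simp [hlt])]
      rw [List.flatMap_append, List.flatMap_cons]
      congr 1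
      · exact (List.flatMap_congr
          (fun g hg => by rw [hfilt_eq g (ne_of_lt (hK1 g hg))])).symm
      · congr 1
        · rw [hfilt_kx, List.foldl_append]
          simp
        · exact (List.flatMap_congr
            (fun g hg => by rw [hfilt_eq g (ne_of_gt (hK2 g hg))])).symm
    · -- new portfolio: x becomes a singleton group between K1 and K2
      have hne : ∀ g, g ∈ K1 ∨ g ∈ K2 → g ≠ k x := by
        rintro g (h | h)
        · exact ne_of_lt (hK1 g h)
        · exact ne_of_gt (hK2 g h)
      have hK' : (K1 ++ K2).Pairwise (fun a b => a < b) :=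
        hK.sublist ((List.sublist_cons_self (k x) K2).append_left K1)
      have hmem' : ∀ g, g ∈ K1 ++ K2 ↔ g ∈ xs.map k := by
        intro g
        constructor
        · intro h
          have hgK : g ∈ K1 ++ k x :: K2 := by
            rcases List.mem_append.1 h with h | h
            · exact List.mem_append.2 (Or.inl h)
            · exact List.mem_append.2 (Or.inr (List.mem_cons_of_mem _ h))
          have := (hmem g).1 hgK
          simp only [List.map_append, List.mem_append, List.map_cons, List.map_nil,
            List.mem_singleton] at this
          rcases this with h' | h'
          · exact h'
          · exact absurd h' (hne g (List.mem_append.1 h))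
        · intro h
          have hgK := (hmem g).2 (by simp [h])
          rcases List.mem_append.1 hgK with h' | h'
          · exact List.mem_append.2 (Or.inl h')
          · rcases List.mem_cons.1 h' with h'' | h''
            · exact absurd (h'' ▸ h) hx
            · exact List.mem_append.2 (Or.inr h'')
      rw [ih _ hK' hmem']
      simp only [List.foldl_cons, List.foldl_nil]
      rw [List.flatMap_append]
      rw [pv_insertBy_skip _ x _ _ (by
        intro y hy
        obtain ⟨g, hg, hyg⟩ := List.mem_flatMap.1 hy
        have hlt : k y < k x := (hgrp g y hyg) ▸ hK1 g hg
        simp [hlt, lt_asymm hlt])]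
      rw [pv_insertBy_front _ x _ (by
        intro y hy
        obtain ⟨g, hg, hyg⟩ := List.mem_flatMap.1 hy
        have hlt : k x < k y := (hgrp g y hyg) ▸ hK2 g hg
        simp [hlt])]
      have hempty : xs.filter (fun y => k y == k x) = [] := by
        rw [List.filter_eq_nil_iff]
        intro y hy
        simp only [beq_iff_eq]
        exact fun he => hx (he ▸ List.mem_map_of_mem hy)
      have h1 : K1.flatMap (fun g => ((xs ++ [x]).filter (fun y => k y == g)).foldl
            (fun acc x => PySem.List.insertBy Bg x acc) [])
          = K1.flatMap (fun g => (xs.filter (fun y => k y == g)).foldl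
            (fun acc x => PySem.List.insertBy Bg x acc) []) :=
        List.flatMap_congr (fun g hg => by rw [hfilt_eq g (ne_of_lt (hK1 g hg))])
      have h2 : K2.flatMap (fun g => ((xs ++ [x]).filter (fun y => k y == g)).foldl
            (fun acc x => PySem.List.insertBy Bg x acc) [])
          = K2.flatMap (fun g => (xs.filter (fun y => k y == g)).foldl
            (fun acc x => PySem.List.insertBy Bg x acc) []) :=
        List.flatMap_congr (fun g hg => by rw [hfilt_eq g (ne_of_gt (hK2 g hg))])
      rw [List.flatMap_append, List.flatMap_cons, h1, h2, hfilt_kx, hempty]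
      simp [PySem.List.insertBy]

-- build loop: getD of the grouping dict is the filter of the input
theorem pv_build_getD (xs : List (List Int)) (d : PySem.Dict Int (List (List Int))) (g : Int) :
    (xs.foldl (fun d swap =>
        let p := PySem.List.pyGetD swap 0 0
        let d := if d.contains p then d else d.insert p []
        d.modify p [] (fun l => l ++ [swap])) d).getD g []
      = d.getD g [] ++ xs.filter (fun x => PySem.List.pyGetD x 0 0 == g) := by
  induction xs generalizing d with
  | nil => simp
  | cons x t ih =>
    simp only [List.foldl_cons]
    rw [ih]
    have hbase : ∀ g' : Int, (if d.contains (PySem.List.pyGetD x 0 0)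
          then d else d.insert (PySem.List.pyGetD x 0 0) []).getD g' []
        = d.getD g' [] := by
      intro g'
      by_cases hc : d.contains (PySem.List.pyGetD x 0 0) = true
      · simp [hc]
      · simp only [hc, Bool.false_eq_true, if_false]
        rw [PySem.Dict.getD_insert]
        by_cases hg : g' = PySem.List.pyGetD x 0 0
        · rw [if_pos hg, hg, PySem.Dict.getD_of_not_contains d _ (by simpa using hc)]
        · rw [if_neg hg]
    rw [PySem.Dict.getD_modify, List.filter_cons]
    by_cases hg : g = PySem.List.pyGetD x 0 0
    · subst hg
      simp [hbase]
    · simp [hg, Ne.symm hg, hbase]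

theorem pv_build_keys (xs : List (List Int)) (d : PySem.Dict Int (List (List Int))) :
    (xs.foldl (fun d swap =>
        let p := PySem.List.pyGetD swap 0 0
        let d := if d.contains p then d else d.insert p []
        d.modify p [] (fun l => l ++ [swap])) d).keys
      = PySem.Set.update d.keys (xs.map (fun x => PySem.List.pyGetD x 0 0)) := by
  induction xs generalizing d with
  | nil => simp [PySem.Set.update]
  | cons x t ih =>
    simp only [List.foldl_cons, List.map_cons]
    rw [ih]
    have hstep : ((if d.contains (PySem.List.pyGetD x 0 0)
          then d else d.insert (PySem.List.pyGetD x 0 0) []).modify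
            (PySem.List.pyGetD x 0 0) [] (fun l => l ++ [x])).keys
        = PySem.Set.add d.keys (PySem.List.pyGetD x 0 0) := by
      rw [PySem.Dict.keys_modify]
      by_cases hc : d.contains (PySem.List.pyGetD x 0 0) = true
      · have hmemk : PySem.Set.contains d.keys (PySem.List.pyGetD x 0 0) = true := by
          simpa [PySem.Set.contains] using (PySem.Dict.contains_iff_mem_keys d _).1 hc
        rw [if_pos hc, PySem.Dict.keys_insert_of_contains d _ hc, PySem.Set.add, if_pos hmemk]
      · have hnot : PySem.List.pyGetD x 0 0 ∉ d.keys :=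
          fun hm => hc ((PySem.Dict.contains_iff_mem_keys d _).2 hm)
        rw [if_neg hc,
          PySem.Dict.keys_insert_of_contains _ _ (PySem.Dict.contains_insert_self _ _ _),
          PySem.Dict.keys_insert_of_not_contains d _ (by simpa using hc),
          PySem.Set.add, if_neg (by simp [PySem.Set.contains, hnot])]
    rw [hstep]
    rfl

-- the per-portfolio sort loop keeps the key list
theorem pv_sortloop_keys (ks : List Int) (d : PySem.Dict Int (List (List Int)))
    (h : ∀ k ∈ ks, k ∈ d.keys) :
    (ks.foldl (fun d portfolio =>
        d.modify portfolio [] (fun v =>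
          PySem.List.sorted v (fun x => PySem.List.pyGetD x 3 0) true)) d).keys = d.keys := by
  induction ks generalizing d with
  | nil => simp
  | cons k t ih =>
    simp only [List.foldl_cons]
    have hk : (d.modify k [] (fun v =>
        PySem.List.sorted v (fun x => PySem.List.pyGetD x 3 0) true)).keys = d.keys := by
      rw [PySem.Dict.keys_modify,
        PySem.Dict.keys_insert_of_contains d _
          ((PySem.Dict.contains_iff_mem_keys d k).2 (h k (by simp)))]
    rw [ih _ (fun k' hk' => by rw [hk]; exact h k' (by simp [hk'])), hk]

-- the per-portfolio sort loop leaves keys outside the list untouched …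
theorem pv_sortloop_getD_not_mem (ks : List Int) (d : PySem.Dict Int (List (List Int))) (g : Int)
    (h : g ∉ ks) :
    (ks.foldl (fun d portfolio =>
        d.modify portfolio [] (fun v =>
          PySem.List.sorted v (fun x => PySem.List.pyGetD x 3 0) true)) d).getD g []
      = d.getD g [] := by
  induction ks generalizing d with
  | nil => simp
  | cons k t ih =>
    simp only [List.foldl_cons]
    rw [ih _ (fun hm => h (by simp [hm])), PySem.Dict.getD_modify,
      if_neg (fun he => h (by simp [he]))]

-- … and sorts each listed key exactly once
theorem pv_sortloop_getD_mem (ks : List Int) (d : PySem.Dict Int (List (List Int))) (g : Int)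
    (hnd : ks.Nodup) (h : g ∈ ks) :
    (ks.foldl (fun d portfolio =>
        d.modify portfolio [] (fun v =>
          PySem.List.sorted v (fun x => PySem.List.pyGetD x 3 0) true)) d).getD g []
      = PySem.List.sorted (d.getD g []) (fun x => PySem.List.pyGetD x 3 0) true := by
  induction ks generalizing d with
  | nil => simp at h
  | cons k t ih =>
    simp only [List.foldl_cons]
    by_cases hg : g = k
    · subst hg
      rw [pv_sortloop_getD_not_mem t _ g (by simp at hnd; exact hnd.1),
        PySem.Dict.getD_modify, if_pos rfl]
    · rcases List.mem_cons.1 h with he | ht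
      · exact absurd he hg
      · rw [ih _ (by simp at hnd; exact hnd.2) ht, PySem.Dict.getD_modify, if_neg hg]

-- ===== VERDICT (by name: the statement is the Claim_ definition above) =====
theorem reorder_swaps_py_spec : Claim_equal_reorder_swaps_py := by
  unfold Claim_equal_reorder_swaps_py
  intro swaps _ _
  unfold Spec_reorder_swaps_py reorder_swaps_py reorder_swaps_py_alt
  by_cases hlen : swaps.length < 2
  · rw [if_pos hlen, if_pos hlen]
  · rw [if_neg hlen, if_neg hlen]
    dsimp only
    generalize hd1 : swaps.foldl (fun d swap =>
        (if d.contains (PySem.List.pyGetD swap 0 0) then d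
         else d.insert (PySem.List.pyGetD swap 0 0) []).modify
          (PySem.List.pyGetD swap 0 0) [] (fun l => l ++ [swap])) PySem.Dict.empty = D
    have hkeys : D.keys
        = PySem.Set.ofList (swaps.map (fun x => PySem.List.pyGetD x 0 0)) := by
      rw [← hd1, pv_build_keys]
      rfl
    have hgetD : ∀ g : Int, D.getD g []
        = swaps.filter (fun x => PySem.List.pyGetD x 0 0 == g) := by
      intro g
      rw [← hd1, pv_build_getD]
      simp
    rw [hkeys]
    rw [pv_sortloop_keys _ _ (fun k hk => by rw [hkeys]; exact hk), hkeys]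
    rw [PySem.List.foldl_append_eq_flatMap]
    simp only [List.nil_append]
    have hflat : (PySem.List.sorted
          (PySem.Set.ofList (swaps.map (fun x => PySem.List.pyGetD x 0 0)))
          (fun g => g) false).flatMap (fun portfolio =>
            ((PySem.Set.ofList (swaps.map (fun x => PySem.List.pyGetD x 0 0))).foldl
              (fun d portfolio => d.modify portfolio [] (fun v =>
                PySem.List.sorted v (fun x => PySem.List.pyGetD x 3 0) true)) D).getD portfolio [])
        = (PySem.List.sorted
          (PySem.Set.ofList (swaps.map (fun x => PySem.List.pyGetD x 0 0)))
          (fun g => g) false).flatMap (fun g =>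
            (swaps.filter (fun x => PySem.List.pyGetD x 0 0 == g)).foldl
              (fun acc x => PySem.List.insertBy
                (fun a b => decide (PySem.List.pyGetD b 3 0 < PySem.List.pyGetD a 3 0)) x acc) []) := by
      refine List.flatMap_congr (fun g hg => ?_)
      rw [pv_sortloop_getD_mem _ _ _ (PySem.Set.nodup_ofList _)
          ((PySem.List.mem_sorted _ _ _ _).1 hg), hgetD,
        PySem.List.sorted_rev_eq_foldl_insertBy]
    rw [hflat]
    have hK := PySem.List.sorted_ofList_pairwise_lt
      (κ := Int) (swaps.map (fun x => PySem.List.pyGetD x 0 0))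
    have hmem : ∀ g : Int, g ∈ PySem.List.sorted
        (PySem.Set.ofList (swaps.map (fun x => PySem.List.pyGetD x 0 0))) (fun g => g) false
        ↔ g ∈ swaps.map (fun x => PySem.List.pyGetD x 0 0) := by
      intro g
      rw [PySem.List.mem_sorted, PySem.Set.mem_ofList]
    -- unfold sorted2 on the B side and turn the negated secondary key into a flipped comparison
    show _ = PySem.List.sorted2 swaps (fun x => PySem.List.pyGetD x 0 0)
      (fun x => -(PySem.List.pyGetD x 3 0)) false
    simp only [PySem.List.sorted2, neg_lt_neg_iff, if_neg (by simp : ¬ (false = true))]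
    rw [pv_grouped (fun x => PySem.List.pyGetD x 0 0)
      (fun a b => decide (PySem.List.pyGetD b 3 0 < PySem.List.pyGetD a 3 0)) swaps _ hK hmem]
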